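-- pv_equiv track=rewrite | github.com/KocWozniakPiotr/yamiru | scripts/photo_stamp.py | grow_image
-- ===== SOURCE A (Python) =====
-- def grow_image(pic, size):
--     new_pic = []
--     for _n in pic:
--         for _o in range(size):
--             new_pic.append(_n)
--     _i = 0
--     for _r in new_pic:
--         old_row = _r
--         new_row = ''
--         for _s in old_row:
--             new_row += _s * size
--         new_pic[_i] = new_row
--         _i += 1
--     return new_pic
-- ===== SOURCE B (Python) =====
-- def grow_image(pic, size):
--     out = []
--     for row in pic:
--         expanded = ''.join(ch * size for ch in row)
--         out.extend([expanded] * size)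
--     return out
-- ===== Notes on version B (the rewrite author's own statement) =====
-- stated objective: simpler
-- what changed: Single fused pass: each original row is horizontally expanded once via ''.join and appended size times, instead of A's two phases (vertically duplicating raw rows, then rewriting each list element in place with an index counter and += string building).
import Mathlib
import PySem

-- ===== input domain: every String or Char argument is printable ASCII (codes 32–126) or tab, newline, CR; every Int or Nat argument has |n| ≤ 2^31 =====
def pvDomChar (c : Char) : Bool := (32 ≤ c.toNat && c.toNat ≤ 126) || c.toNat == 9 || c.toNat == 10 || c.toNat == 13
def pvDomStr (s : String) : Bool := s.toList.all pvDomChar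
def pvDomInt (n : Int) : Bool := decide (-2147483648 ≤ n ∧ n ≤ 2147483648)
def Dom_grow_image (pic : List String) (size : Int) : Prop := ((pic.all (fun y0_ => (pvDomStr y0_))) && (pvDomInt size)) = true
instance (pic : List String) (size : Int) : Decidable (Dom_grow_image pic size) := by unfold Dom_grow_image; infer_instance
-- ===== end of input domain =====

-- B fuses A's two phases into one pass: each row is expanded horizontally once and appended size times (simpler decomposition; same asymptotic cost).


-- ===== PORT A =====
-- new_row building: ''  then  new_row += _s * size  for each character _s of old_row
def growARow (row : List Char) (size : Int) : List Char :=
  row.foldl (fun nr c => nr ++ PySem.List.pyRepeat [c] size) []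

-- second phase: 'for _r in new_pic: … new_pic[_i] = new_row; _i += 1' — the live list is only
-- ever mutated at the index just visited, so the iteration is index-by-index with in-place set
def growARewrite (cur : List String) (i : Nat) (size : Int) : List String :=
  if h : i < cur.length then
    growARewrite (cur.set i (String.ofList (growARow (cur[i]).toList size))) (i + 1) size
  else cur
termination_by cur.length - i
decreasing_by simp_all; omega

def grow_image (pic : List String) (size : Int) : List String :=
  let new_pic := pic.foldl (fun acc n => (PySem.List.pyRange 0 size 1).foldl (fun a _ => a ++ [n]) acc) []
  growARewrite new_pic 0 size

-- ===== PORT B =====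
def grow_image_alt (pic : List String) (size : Int) : List String :=
  pic.foldl (fun out row =>
    out ++ PySem.List.pyRepeat
      [String.ofList (PySem.Chars.join [] (row.toList.map (fun ch => PySem.List.pyRepeat [ch] size)))] size) []

-- ===== PRECONDITION & SPEC =====
def Spec_grow_image (pic : List String) (size : Int) (out : List String) : Prop := out = grow_image_alt pic size
instance (pic : List String) (size : Int) (out : List String) : Decidable (Spec_grow_image pic size out) := by unfold Spec_grow_image; infer_instance

-- ===== CLAIM (what is proved, stated in full; the proofs are below) =====
def Claim_equal_grow_image : Prop := ∀ (pic : List String) (size : Int), Dom_grow_image pic size → Spec_grow_image pic size (grow_image pic size)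

-- ===== LEMMAS AND PROOFS =====

theorem foldl_append_const {α β : Type} (l : List α) (n : β) (acc : List β) :
    l.foldl (fun a _ => a ++ [n]) acc = acc ++ List.replicate l.length n := by
  induction l generalizing acc with
  | nil => simp
  | cons x xs ih =>
    rw [List.foldl_cons, ih, List.length_cons, List.append_assoc]
    simp [List.replicate_succ]

theorem intersperse_nil_flatten (l : List (List Char)) :
    (List.intersperse ([] : List Char) l).flatten = l.flatten := by
  induction l with
  | nil => rfl
  | cons p ps ih =>
    cases ps with
    | nil => rfl
    | cons q qs => simp_all [List.intersperse]

theorem joinNil_eq_flatten (parts : List (List Char)) :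
    PySem.Chars.join [] parts = parts.flatten := by
  simp only [PySem.Chars.join, List.intercalate]
  exact intersperse_nil_flatten parts

theorem growARow_eq (row : List Char) (size : Int) :
    growARow row size = (row.map (fun c => List.replicate size.toNat c)).flatten := by
  unfold growARow
  have h : ∀ (l : List Char) (acc : List Char),
      l.foldl (fun nr c => nr ++ PySem.List.pyRepeat [c] size) acc
        = acc ++ (l.map (fun c => List.replicate size.toNat c)).flatten := by
    intro l
    induction l with
    | nil => simp
    | cons c cs ih =>
      intro acc
      rw [List.foldl_cons, ih, PySem.List.pyRepeat_singleton]
      simp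
  exact h row []

theorem growARewrite_eq (cur : List String) (i : Nat) (size : Int) :
    growARewrite cur i size
      = cur.take i ++ (cur.drop i).map (fun r => String.ofList (growARow r.toList size)) := by
  by_cases h : i < cur.length
  · rw [growARewrite]
    simp only [h, dite_true]
    rw [growARewrite_eq (cur.set i (String.ofList (growARow (cur[i]).toList size))) (i + 1) size]
    have htake : (cur.set i (String.ofList (growARow (cur[i]).toList size))).take (i + 1)
        = cur.take i ++ [String.ofList (growARow (cur[i]).toList size)] := by
      rw [List.set_eq_take_append_cons_drop, if_pos h, List.take_append]
      simp only [List.length_take, Nat.min_eq_left (Nat.le_of_lt h)]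
      rw [List.take_take, Nat.min_eq_right (Nat.le_succ i), Nat.add_sub_cancel_left]
      simp
    have hdrop : (cur.set i (String.ofList (growARow (cur[i]).toList size))).drop (i + 1)
        = cur.drop (i + 1) := by
      rw [List.set_eq_take_append_cons_drop, if_pos h]
      simp [List.drop_append, List.length_take, Nat.min_eq_left (Nat.le_of_lt h)]
    rw [htake, hdrop, List.drop_eq_getElem_cons h, List.map_cons, List.append_assoc]
    rfl
  · rw [growARewrite]
    simp only [h, dite_false]
    rw [List.drop_eq_nil_of_le (Nat.le_of_not_lt h), List.take_of_length_le (Nat.le_of_not_lt h)]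
    simp
termination_by cur.length - i
decreasing_by simp [List.length_set]; omega

theorem foldlA_phase1 (pic : List String) (size : Int) (acc : List String) :
    pic.foldl (fun acc n => (PySem.List.pyRange 0 size 1).foldl (fun a _ => a ++ [n]) acc) acc
      = acc ++ pic.flatMap (fun n => List.replicate size.toNat n) := by
  induction pic generalizing acc with
  | nil => simp
  | cons x xs ih =>
    rw [List.foldl_cons, foldl_append_const, ih]
    simp [PySem.List.length_pyRange_one]

theorem foldl_append_replicate {α β : Type} (l : List α) (f : α → β) (n : Nat) (acc : List β) :
    l.foldl (fun out row => out ++ List.replicate n (f row)) acc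
      = acc ++ l.flatMap (fun row => List.replicate n (f row)) := by
  induction l generalizing acc with
  | nil => simp
  | cons x xs ih => rw [List.foldl_cons, ih]; simp

theorem grow_image_eq_alt (pic : List String) (size : Int) :
    grow_image pic size = grow_image_alt pic size := by
  unfold grow_image grow_image_alt
  rw [foldlA_phase1, List.nil_append, growARewrite_eq]
  simp only [PySem.List.pyRepeat_singleton]
  rw [foldl_append_replicate pic
        (fun row => String.ofList (PySem.Chars.join [] (row.toList.map (fun ch => List.replicate size.toNat ch))))
        size.toNat []]
  rw [List.nil_append, List.take_zero, List.drop_zero, List.nil_append, List.map_flatMap]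
  refine List.flatMap_congr ?_
  intro row _
  rw [List.map_replicate]
  congr 2
  rw [growARow_eq, joinNil_eq_flatten]

-- ===== VERDICT (by name: the statement is the Claim_ definition above) =====
theorem grow_image_spec : Claim_equal_grow_image := by
  intro pic size _
  exact grow_image_eq_alt pic size
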